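-- pv_equiv track=rewrite | github.com/mdmusab123/craftly | worker.py | normalize_resource_flag_args
-- ===== SOURCE A (Python) =====
-- RESOURCE_FLAG_PREFIXES = ("--cpu", "--ram", "--gpu")
--
-- def normalize_resource_flag_args(argv: list[str]) -> list[str]:
--     normalized: list[str] = []
--     for arg in argv:
--         matched = False
--         for prefix in RESOURCE_FLAG_PREFIXES:
--             if arg.startswith(prefix) and arg != prefix:
--                 suffix = arg[len(prefix):]
--                 if suffix.isdigit():
--                     normalized.extend([prefix, suffix])
--                     matched = True
--                     break
--         if not matched:
--             normalized.append(arg)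
--     return normalized
-- ===== SOURCE B (Python) =====
-- RESOURCE_FLAG_PREFIXES = ("--cpu", "--ram", "--gpu")
--
-- def normalize_resource_flag_args(argv: list[str]) -> list[str]:
--     # Reversed recognition: instead of trying each known prefix at the front,
--     # scan each arg from the RIGHT, peel off the maximal run of digit
--     # characters, and then check whether the remaining stem is a resource flag.
--     out: list[str] = []
--     for arg in argv:
--         n = len(arg)
--         while n > 0 and arg[n - 1].isdigit():
--             n -= 1
--         stem, digits = arg[:n], arg[n:]
--         if digits and stem in RESOURCE_FLAG_PREFIXES:
--             out.append(stem)
--             out.append(digits)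
--         else:
--             out.append(arg)
--     return out
-- ===== Notes on version B (the rewrite author's own statement) =====
-- stated objective: alternative
-- what changed: B reverses the recognition direction: instead of A's inner loop trying each known prefix at the front (startswith + slice + isdigit on the remainder + break), B scans each arg from the right peeling the maximal run of digit characters, and then checks whether the remaining stem is one of the resource flags; correct because the flags end in a non-digit character, so arg = prefix + digits exactly when the maximal digit suffix is nonempty and what precedes it is a flag.
import Mathlib
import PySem

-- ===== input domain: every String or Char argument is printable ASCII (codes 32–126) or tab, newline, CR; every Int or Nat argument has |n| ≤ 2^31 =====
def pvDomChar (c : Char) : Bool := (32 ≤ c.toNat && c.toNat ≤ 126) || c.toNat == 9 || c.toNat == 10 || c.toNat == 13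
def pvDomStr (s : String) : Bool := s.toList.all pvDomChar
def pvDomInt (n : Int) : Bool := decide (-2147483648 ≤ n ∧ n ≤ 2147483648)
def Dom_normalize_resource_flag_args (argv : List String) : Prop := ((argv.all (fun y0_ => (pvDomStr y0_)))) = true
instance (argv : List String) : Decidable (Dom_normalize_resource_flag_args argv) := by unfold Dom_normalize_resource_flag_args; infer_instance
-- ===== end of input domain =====

-- B reverses the recognition direction: it peels the maximal digit run from the right of each
-- arg and then checks the remaining stem against the flag names, instead of A's inner loop
-- trying each known prefix at the front (alternative algorithm, same cost).


-- ===== PORT A =====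
def RESOURCE_FLAG_PREFIXES : List String := ["--cpu", "--ram", "--gpu"]

-- inner `for prefix in RESOURCE_FLAG_PREFIXES` loop of A with its break:
-- returns `some [prefix, suffix]` on the first successful prefix (matched = True), `none` otherwise
def pvMatchPrefix (arg : String) : List String → Option (List String)
  | [] => none
  | pfx :: rest =>
    if PySem.Str.startswith arg pfx && !(arg == pfx) then
      let suffix := PySem.Str.slice arg (some (PySem.Str.len pfx)) none
      if PySem.Str.strIsdigit suffix then some [pfx, suffix]
      else pvMatchPrefix arg rest
    else pvMatchPrefix arg rest

def normalize_resource_flag_args (argv : List String) : List String :=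
  argv.foldl (fun normalized arg =>
    normalized ++ (match pvMatchPrefix arg RESOURCE_FLAG_PREFIXES with
      | some ext => ext
      | none => [arg])) []

-- ===== PORT B =====
-- Source B's `while n > 0 and arg[n-1].isdigit(): n -= 1`, run down from n
def pvStemLen (cs : List Char) : Nat → Nat
  | 0 => 0
  | n + 1 => if (cs[n]?.any PySem.Chars.isdigit) then pvStemLen cs n else n + 1

def pvSplitArg (arg : String) : List String :=
  let n := pvStemLen arg.toList arg.toList.length
  let stem := PySem.Str.slice arg none (some n)
  let digits := PySem.Str.slice arg (some n) none
  if !(digits == "") && RESOURCE_FLAG_PREFIXES.contains stem then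
    [stem, digits]
  else [arg]

def normalize_resource_flag_args_alt (argv : List String) : List String :=
  argv.foldl (fun out arg => out ++ pvSplitArg arg) []

-- ===== PRECONDITION & SPEC =====
def Spec_normalize_resource_flag_args (argv : List String) (out : List String) : Prop := out = normalize_resource_flag_args_alt argv
instance (argv : List String) (out : List String) : Decidable (Spec_normalize_resource_flag_args argv out) := by unfold Spec_normalize_resource_flag_args; infer_instance

-- ===== CLAIM (what is proved, stated in full; the proofs are below) =====
def Claim_equal_normalize_resource_flag_args : Prop := ∀ (argv : List String), Dom_normalize_resource_flag_args argv → Spec_normalize_resource_flag_args argv (normalize_resource_flag_args argv)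

-- ===== LEMMAS AND PROOFS =====

-- intermediate characterisation of one arg's expansion: split at the FIXED width 5
def pvExpand (arg : String) : List String :=
  let head := PySem.Str.slice arg none (some 5)
  let rest := PySem.Str.slice arg (some 5) none
  if (head == "--cpu" || head == "--ram" || head == "--gpu") && PySem.Str.strIsdigit rest then
    [head, rest]
  else [arg]

-- a 5-char prefix test is one comparison of the 5-char head slice
theorem pv_startswith_eq_head (arg p : String) (hp : p.toList.length = 5) :
    PySem.Str.startswith arg p = (PySem.Str.slice arg none (some 5) == p) := by
  have h1 : PySem.Str.startswith arg p = true ↔ p.toList <+: arg.toList := by simp [pysem]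
  have h2 : (PySem.Str.slice arg none (some 5) == p) = true ↔
      arg.toList.take 5 = p.toList := by
    rw [beq_iff_eq]
    constructor
    · intro h; rw [← h]; simp [pysem]
    · intro h; apply String.toList_inj.mp; rw [← h]; simp [pysem]
  rw [Bool.eq_iff_iff, h1, h2, List.prefix_iff_eq_take, hp]
  exact eq_comm

-- if the 5-char head is a prefix string and the tail is a nonempty digit string, arg ≠ prefix
theorem pv_ne_of_digit (arg p : String) (hp : p.toList.length = 5)
    (hh : (PySem.Str.slice arg none (some 5) == p) = true)
    (hd : PySem.Str.strIsdigit (PySem.Str.slice arg (some 5) none) = true) :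
    (arg == p) = false := by
  rw [beq_eq_false_iff_ne]
  intro h
  subst h
  have htl : (PySem.Str.slice arg (some 5) none).toList = arg.toList.drop 5 := by simp [pysem]
  have : arg.toList.drop 5 = [] := List.drop_eq_nil_of_le (le_of_eq hp)
  rw [PySem.Str.strIsdigit_eq, htl, this] at hd
  exact absurd hd (by decide)

-- A's per-argument result equals the fixed-width characterisation
theorem pv_match_eq_expand (arg : String) :
    (match pvMatchPrefix arg RESOURCE_FLAG_PREFIXES with
      | some ext => ext
      | none => [arg]) = pvExpand arg := by
  have e1 : PySem.Str.len "--cpu" = 5 := by decide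
  have e2 : PySem.Str.len "--ram" = 5 := by decide
  have e3 : PySem.Str.len "--gpu" = 5 := by decide
  have s1 := pv_startswith_eq_head arg "--cpu" (by decide)
  have s2 := pv_startswith_eq_head arg "--ram" (by decide)
  have s3 := pv_startswith_eq_head arg "--gpu" (by decide)
  simp only [RESOURCE_FLAG_PREFIXES, pvMatchPrefix, pvExpand, e1, e2, e3, s1, s2, s3]
  set hd := PySem.Str.slice arg none (some 5) with hhd
  set rest := PySem.Str.slice arg (some 5) none with hrest
  by_cases hdig : PySem.Str.strIsdigit rest = true
  · have hdig' : PySem.Chars.strIsdigit rest.toList = true := by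
      rw [← PySem.Str.strIsdigit_eq]; exact hdig
    by_cases h1 : (hd == "--cpu") = true
    · have hne := pv_ne_of_digit arg "--cpu" (by decide) h1 hdig
      simp [eq_of_beq h1, beq_eq_false_iff_ne.mp hne, hdig']
    · by_cases h2 : (hd == "--ram") = true
      · have hne := pv_ne_of_digit arg "--ram" (by decide) h2 hdig
        simp [eq_of_beq h2, beq_eq_false_iff_ne.mp hne, hdig']
      · by_cases h3 : (hd == "--gpu") = true
        · have hne := pv_ne_of_digit arg "--gpu" (by decide) h3 hdig
          simp [eq_of_beq h3, beq_eq_false_iff_ne.mp hne, hdig']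
        · simp [ne_of_beq_false (Bool.eq_false_iff.mpr h1),
            ne_of_beq_false (Bool.eq_false_iff.mpr h2),
            ne_of_beq_false (Bool.eq_false_iff.mpr h3), hdig']
  · have hdig' : PySem.Chars.strIsdigit rest.toList = false := by
      rw [← PySem.Str.strIsdigit_eq, Bool.eq_false_iff]; exact fun h => hdig h
    simp [hdig']

-- pvStemLen never exceeds its start index
theorem pvStemLen_le (cs : List Char) : ∀ m, pvStemLen cs m ≤ m := by
  intro m
  induction m with
  | zero => simp [pvStemLen]
  | succ n ih =>
    simp only [pvStemLen]
    split
    · exact le_trans ih (Nat.le_succ n)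
    · exact le_refl _

-- every character at or after pvStemLen cs m (below m) is a digit
theorem pvStemLen_digits (cs : List Char) : ∀ m, ∀ i c, pvStemLen cs m ≤ i → i < m →
    cs[i]? = some c → PySem.Chars.isdigit c = true := by
  intro m
  induction m with
  | zero => intro i c _ h; omega
  | succ n ih =>
    intro i c hle hlt hget
    simp only [pvStemLen] at hle
    by_cases hdig : (cs[n]?.any PySem.Chars.isdigit) = true
    · rw [if_pos hdig] at hle
      rcases Nat.lt_or_ge i n with h | h
      · exact ih i c hle h hget
      · have : i = n := by omega
        subst this
        rw [hget] at hdig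
        simpa using hdig
    · rw [if_neg hdig] at hle; omega

-- if cs[k-1] is a non-digit and everything from k on is a digit, the scan stops at k
theorem pvStemLen_stable (cs : List Char) (k : Nat) (hk0 : k ≠ 0)
    (hnd : (cs[k - 1]?.any PySem.Chars.isdigit) = false)
    (hd : ∀ i c, k ≤ i → cs[i]? = some c → PySem.Chars.isdigit c = true) :
    ∀ m, k ≤ m → m ≤ cs.length → pvStemLen cs m = k := by
  intro m hkm hml
  induction m with
  | zero => omega
  | succ n ih =>
    rcases Nat.lt_or_ge k (n + 1) with h | h
    · -- k ≤ n : cs[n] exists and is a digit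
      have hn : n < cs.length := by omega
      obtain ⟨c, hc⟩ : ∃ c, cs[n]? = some c := ⟨cs[n], List.getElem?_eq_getElem hn⟩
      have : PySem.Chars.isdigit c = true := hd n c (by omega) hc
      simp only [pvStemLen, hc, Option.any_some, this, if_true]
      exact ih (by omega) (by omega)
    · -- k = n + 1 : the check at index n = k - 1 fails
      have : k = n + 1 := by omega
      subst this
      simp only [pvStemLen]
      rw [if_neg]
      simpa using hnd

-- strIsdigit unfolded: nonempty and all digits
theorem pv_strIsdigit_char (cs : List Char) :
    PySem.Chars.strIsdigit cs = (!cs.isEmpty && cs.all PySem.Chars.isdigit) := by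
  simp [PySem.Chars.strIsdigit]

-- the fixed-width characterisation equals B's suffix-scan split
theorem pv_expand_eq_split (arg : String) : pvExpand arg = pvSplitArg arg := by
  simp only [pvExpand, pvSplitArg]
  set cs := arg.toList with hcs
  set n := pvStemLen cs cs.length with hn
  have hnle : n ≤ cs.length := pvStemLen_le cs cs.length
  have hstem : (PySem.Str.slice arg none (some (n : Int))).toList = cs.take n := by
    simp [pysem, ← hcs]
  have hdigtl : (PySem.Str.slice arg (some (n : Int)) none).toList = cs.drop n := by
    simp [pysem, ← hcs]
  have hheadtl : (PySem.Str.slice arg none (some 5)).toList = cs.take 5 := by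
    simp [pysem, ← hcs]
  have hresttl : (PySem.Str.slice arg (some 5) none).toList = cs.drop 5 := by
    simp [pysem, ← hcs]
  by_cases hC : ((PySem.Str.slice arg none (some 5) == "--cpu"
        || PySem.Str.slice arg none (some 5) == "--ram"
        || PySem.Str.slice arg none (some 5) == "--gpu")
      && PySem.Str.strIsdigit (PySem.Str.slice arg (some 5) none)) = true
  · -- A-side condition holds: cs = prefix ++ nonempty digits, so the scan stops exactly at 5
    obtain ⟨hhead, hdig⟩ := Bool.and_eq_true_iff.mp hC
    have hdig' : PySem.Chars.strIsdigit (cs.drop 5) = true := by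
      rw [← hresttl, ← PySem.Str.strIsdigit_eq]; exact hdig
    rw [pv_strIsdigit_char, Bool.and_eq_true] at hdig'
    have hne1 : cs.drop 5 ≠ [] := by
      intro h
      rw [h] at hdig'
      simpa using hdig'.1
    have hne2 : (cs.drop 5).all PySem.Chars.isdigit = true := hdig'.2
    have hlen5 : 5 < cs.length := by
      by_contra h
      exact hne1 (List.drop_eq_nil_of_le (by omega))
    -- character at index 4 is the last letter of the matched prefix: not a digit
    have hnd4 : (cs[4]?.any PySem.Chars.isdigit) = false := by
      have h4 : cs[4]? = (cs.take 5)[4]? := by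
        rw [List.getElem?_take_of_lt (by omega)]
      rw [Bool.or_eq_true, Bool.or_eq_true] at hhead
      rcases hhead with (h | h) | h
      · have hts : cs.take 5 = "--cpu".toList := by rw [← hheadtl, (beq_iff_eq.mp h)]
        rw [h4, hts]; decide
      · have hts : cs.take 5 = "--ram".toList := by rw [← hheadtl, (beq_iff_eq.mp h)]
        rw [h4, hts]; decide
      · have hts : cs.take 5 = "--gpu".toList := by rw [← hheadtl, (beq_iff_eq.mp h)]
        rw [h4, hts]; decide
    have hdall : ∀ i c, 5 ≤ i → cs[i]? = some c → PySem.Chars.isdigit c = true := by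
      intro i c hi hget
      have hi' : i < cs.length := (List.getElem?_eq_some_iff.mp hget).1
      have hmem : c ∈ cs.drop 5 := by
        apply List.mem_of_getElem? (i := i - 5)
        rw [List.getElem?_drop]
        rwa [Nat.add_sub_cancel' hi]
      exact List.all_eq_true.mp hne2 c hmem
    have hn5 : n = 5 := by
      rw [hn]
      exact pvStemLen_stable cs 5 (by omega) hnd4 hdall cs.length (by omega) (le_refl _)
    have hslice_stem : PySem.Str.slice arg none (some (n : Int)) = PySem.Str.slice arg none (some 5) := by
      rw [hn5]; norm_num
    have hslice_dig : PySem.Str.slice arg (some (n : Int)) none = PySem.Str.slice arg (some 5) none := by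
      rw [hn5]; norm_num
    rw [if_pos hC, hslice_stem, hslice_dig, if_pos]
    rw [Bool.and_eq_true]
    constructor
    · have hf : (PySem.Str.slice arg (some 5) none == "") = false := by
        rw [Bool.eq_false_iff, ne_eq, beq_iff_eq]
        intro h
        apply hne1
        rw [← hresttl, h]; rfl
      simp [hf]
    · simp only [RESOURCE_FLAG_PREFIXES, List.contains_cons, List.contains_nil]
      rw [Bool.or_eq_true, Bool.or_eq_true] at hhead
      rcases hhead with (h | h) | h <;> simp [beq_iff_eq.mp h]
  · -- A-side condition fails: B's condition must fail too
    rw [if_neg hC, if_neg]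
    intro hB
    obtain ⟨hdne, hmem⟩ := Bool.and_eq_true_iff.mp hB
    have hdrop_ne : cs.drop n ≠ [] := by
      intro h
      have hdne' : (PySem.Str.slice arg (some (n : Int)) none == "") = false := by
        simpa using hdne
      rw [Bool.eq_false_iff, ne_eq, beq_iff_eq] at hdne'
      apply hdne' 
      apply String.toList_inj.mp
      rw [hdigtl, h]; rfl
    have hnlt : n < cs.length := by
      rcases Nat.lt_or_ge n cs.length with h | h
      · exact h
      · exact absurd (List.drop_eq_nil_of_le h) hdrop_ne
    have hstemlen : (cs.take n).length = n := by
      rw [List.length_take]; omega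
    have hmem' : PySem.Str.slice arg none (some (n : Int)) = "--cpu"
        ∨ PySem.Str.slice arg none (some (n : Int)) = "--ram"
        ∨ PySem.Str.slice arg none (some (n : Int)) = "--gpu" := by
      simp only [RESOURCE_FLAG_PREFIXES, List.contains_cons, List.contains_nil,
        Bool.or_eq_true, Bool.or_false, beq_iff_eq] at hmem
      exact hmem
    have hn5 : n = 5 := by
      have hl : (cs.take n).length = 5 := by
        rcases hmem' with h | h | h <;> (rw [← hstem, h]; rfl)
      rw [hstemlen] at hl
      exact hl
    apply hC
    rw [Bool.and_eq_true]
    constructor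
    · have hsl : PySem.Str.slice arg none (some 5) = PySem.Str.slice arg none (some (n : Int)) := by
        rw [hn5]; norm_num
      rw [hsl, Bool.or_eq_true, Bool.or_eq_true]
      rcases hmem' with h | h | h <;> simp [h]
    · rw [PySem.Str.strIsdigit_eq, hresttl, pv_strIsdigit_char]
      have hd5 : cs.drop 5 = cs.drop n := by rw [hn5]
      rw [hd5, Bool.and_eq_true]
      constructor
      · simpa [List.isEmpty_iff] using hdrop_ne
      · rw [List.all_eq_true]
        intro c hc
        obtain ⟨i, hi⟩ := List.mem_iff_getElem?.mp hc
        have hget' : cs[n + i]? = some c := by rw [← List.getElem?_drop]; exact hi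
        have hlt : n + i < cs.length := (List.getElem?_eq_some_iff.mp hget').1
        exact pvStemLen_digits cs cs.length (n + i) c (by omega) hlt hget'

-- ===== VERDICT (by name: the statement is the Claim_ definition above) =====
theorem normalize_resource_flag_args_spec : Claim_equal_normalize_resource_flag_args := by
  intro argv _
  unfold Spec_normalize_resource_flag_args normalize_resource_flag_args normalize_resource_flag_args_alt
  rw [PySem.List.foldl_append_eq_flatMap, PySem.List.foldl_append_eq_flatMap,
    List.nil_append, List.nil_append]
  apply List.flatMap_congr
  intro arg _
  rw [pv_match_eq_expand, pv_expand_eq_split]
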